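-- pv_equiv track=rewrite | github.com/EmirhanPolat14/Python-Sifirdan-Ileri-Seviye-Programlama | Fonksiyonlar/ebob.py | ebob_bul
-- ===== SOURCE A (Python) =====
-- def ebob_bul(sayi1,sayi2):
--     i = 1
--     ebob =1
--     while sayi1 >= i and sayi2 >= i:
--         if sayi1 % i == 0 and sayi2 % i == 0:
--             ebob *= i
--         i += 1
--     return ebob
-- ===== SOURCE B (Python) =====
-- def ebob_bul(sayi1, sayi2):
--     if sayi1 < 1 or sayi2 < 1:
--         return 1
--     a, b = sayi1, sayi2
--     while b:
--         a, b = b, a % b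
--     prod = 1
--     d = 1
--     while d <= a:
--         if a % d == 0:
--             prod *= d
--         d += 1
--     return prod
-- ===== Notes on version B (the rewrite author's own statement) =====
-- stated objective: faster
-- what changed: B first computes g = gcd(sayi1, sayi2) by the Euclidean algorithm and then multiplies the divisors of g in a loop bounded by g, instead of A's single scan of all i up to min(sayi1, sayi2) testing divisibility of both numbers.
import Mathlib
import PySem

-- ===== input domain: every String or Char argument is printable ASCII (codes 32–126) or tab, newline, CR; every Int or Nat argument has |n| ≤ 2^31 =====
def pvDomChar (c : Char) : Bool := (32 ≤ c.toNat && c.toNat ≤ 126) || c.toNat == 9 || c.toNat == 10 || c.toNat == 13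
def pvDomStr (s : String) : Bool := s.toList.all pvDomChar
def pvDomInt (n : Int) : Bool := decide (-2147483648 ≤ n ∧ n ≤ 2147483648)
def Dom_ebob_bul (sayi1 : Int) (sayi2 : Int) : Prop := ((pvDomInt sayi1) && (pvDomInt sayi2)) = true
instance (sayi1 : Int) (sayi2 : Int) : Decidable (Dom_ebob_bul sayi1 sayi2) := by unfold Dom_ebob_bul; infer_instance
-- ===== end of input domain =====

-- B replaces A's single scan up to min(sayi1,sayi2) by Euclid's gcd followed by a loop
-- bounded by the gcd (objective: faster; equal return values, no side effects involved).

-- ===== PORT A =====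
-- the while loop: i counts up while sayi1 >= i and sayi2 >= i
def ebobLoopA (sayi1 sayi2 i ebob : Int) : Int :=
  if _h : sayi1 ≥ i ∧ sayi2 ≥ i then
    ebobLoopA sayi1 sayi2 (i + 1)
      (if PySem.Int.mod sayi1 i = 0 ∧ PySem.Int.mod sayi2 i = 0 then ebob * i else ebob)
  else ebob
termination_by (min sayi1 sayi2 + 1 - i).toNat
decreasing_by omega

def ebob_bul (sayi1 : Int) (sayi2 : Int) : Int := ebobLoopA sayi1 sayi2 1 1

-- ===== PORT B =====
-- termination fact for Euclid's loop (Python's % has |a % b| < |b| for b ≠ 0)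
theorem pvModNatAbsLt (a b : Int) (hb : ¬ b = 0) :
    (PySem.Int.mod a b).natAbs < b.natAbs := by
  rcases lt_or_gt_of_ne hb with h | h
  · have := PySem.Int.mod_neg_bounds (a := a) h
    omega
  · have h1 := PySem.Int.mod_nonneg (a := a) h
    have h2 := PySem.Int.mod_lt (a := a) h
    omega

-- while b: a, b = b, a % b
def gcdLoopB (a b : Int) : Int :=
  if _h : b = 0 then a else gcdLoopB b (PySem.Int.mod a b)
termination_by b.natAbs
decreasing_by exact pvModNatAbsLt a b _h

-- while d <= a: if a % d == 0: prod *= d; d += 1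
def divLoopB (a d prod : Int) : Int :=
  if _h : d ≤ a then
    divLoopB a (d + 1) (if PySem.Int.mod a d = 0 then prod * d else prod)
  else prod
termination_by (a + 1 - d).toNat
decreasing_by omega

def ebob_bul_alt (sayi1 : Int) (sayi2 : Int) : Int :=
  if sayi1 < 1 ∨ sayi2 < 1 then 1
  else divLoopB (gcdLoopB sayi1 sayi2) 1 1

-- ===== PRECONDITION & SPEC =====
def Spec_ebob_bul (sayi1 : Int) (sayi2 : Int) (out : Int) : Prop := out = ebob_bul_alt sayi1 sayi2
instance (sayi1 : Int) (sayi2 : Int) (out : Int) : Decidable (Spec_ebob_bul sayi1 sayi2 out) := by unfold Spec_ebob_bul; infer_instance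

-- ===== CLAIM (what is proved, stated in full; the proofs are below) =====
def Claim_equal_ebob_bul : Prop := ∀ (sayi1 : Int) (sayi2 : Int), Dom_ebob_bul sayi1 sayi2 → Spec_ebob_bul sayi1 sayi2 (ebob_bul sayi1 sayi2)

-- ===== LEMMAS AND PROOFS =====

-- gcdLoopB really computes a greatest common divisor (positivity, divisibility, universality)
theorem gcdLoopB_props : ∀ (n : Nat) (b a : Int), b.natAbs ≤ n → 0 ≤ b → 1 ≤ a →
    1 ≤ gcdLoopB a b ∧ gcdLoopB a b ∣ a ∧ gcdLoopB a b ∣ b ∧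
      (∀ k : Int, k ∣ a → k ∣ b → k ∣ gcdLoopB a b) := by
  intro n
  induction n with
  | zero =>
    intro b a hn hb ha
    have hb0 : b = 0 := by omega
    rw [gcdLoopB]
    simp [hb0]
    exact ha
  | succ m ih =>
    intro b a hn hb ha
    by_cases hb0 : b = 0
    · rw [gcdLoopB]; simp [hb0]; exact ha
    · have hbpos : 0 < b := lt_of_le_of_ne hb (Ne.symm hb0)
      have h1 := PySem.Int.mod_nonneg (a := a) hbpos
      have h2 := PySem.Int.mod_lt (a := a) hbpos
      have hrec : (PySem.Int.mod a b).natAbs ≤ m := by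
        have := pvModNatAbsLt a b hb0
        omega
      obtain ⟨hg1, hgb, hgm, hgk⟩ := ih (PySem.Int.mod a b) b hrec h1 hbpos
      have heq := PySem.Int.floordiv_mul_add_mod a b
      rw [gcdLoopB]
      simp only [hb0, dite_false]
      refine ⟨hg1, ?_, hgb, ?_⟩
      · -- g ∣ a since a = (a//b)*b + (a mod b)
        have : gcdLoopB b (PySem.Int.mod a b) ∣ PySem.Int.floordiv a b * b + PySem.Int.mod a b :=
          dvd_add (Dvd.dvd.mul_left hgb _) hgm
        rwa [heq] at this
      · intro k hka hkb
        refine hgk k hkb ?_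
        have : k ∣ a - PySem.Int.floordiv a b * b := dvd_sub hka (Dvd.dvd.mul_left hkb _)
        have h3 : a - PySem.Int.floordiv a b * b = PySem.Int.mod a b := by omega
        rwa [h3] at this

-- A's loop multiplies nothing once i has passed every common divisor
theorem ebobLoopA_tail (a b g : Int) (hg1 : 1 ≤ g)
    (hgk : ∀ k : Int, k ∣ a → k ∣ b → k ∣ g) :
    ∀ (n : Nat) (i p : Int), (min a b + 1 - i).toNat ≤ n → g < i → ebobLoopA a b i p = p := by
  intro n
  induction n with
  | zero =>
    intro i p hn hi
    rw [ebobLoopA]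
    have : ¬ (a ≥ i ∧ b ≥ i) := by omega
    simp [this]
  | succ m ih =>
    intro i p hn hi
    rw [ebobLoopA]
    by_cases hguard : a ≥ i ∧ b ≥ i
    · simp only [hguard, and_self, dite_true]
      have hcond : ¬ (PySem.Int.mod a i = 0 ∧ PySem.Int.mod b i = 0) := by
        rintro ⟨h1, h2⟩
        rw [PySem.Int.mod_eq_zero_iff_dvd] at h1 h2
        have := hgk i h1 h2
        have := Int.le_of_dvd (by omega) this
        omega
      rw [if_neg hcond]
      exact ih (i + 1) p (by omega) (by omega)
    · simp [hguard]

-- on [i, g] the two loops advance in lockstep; past g, A's loop is inert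
theorem loop_eq (a b g : Int) (ha : 1 ≤ a) (hb : 1 ≤ b) (hg1 : 1 ≤ g)
    (hga : g ∣ a) (hgb : g ∣ b) (hgk : ∀ k : Int, k ∣ a → k ∣ b → k ∣ g) :
    ∀ (n : Nat) (i p : Int), (g + 1 - i).toNat ≤ n → 1 ≤ i →
      ebobLoopA a b i p = divLoopB g i p := by
  have hgle_a : g ≤ a := Int.le_of_dvd (by omega) hga
  have hgle_b : g ≤ b := Int.le_of_dvd (by omega) hgb
  intro n
  induction n with
  | zero =>
    intro i p hn hi
    have hig : g < i := by omega
    rw [divLoopB]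
    have : ¬ i ≤ g := by omega
    simp only [this, dite_false]
    exact ebobLoopA_tail a b g hg1 hgk (min a b + 1 - i).toNat i p (le_refl _) hig
  | succ m ih =>
    intro i p hn hi
    by_cases hig : i ≤ g
    · rw [ebobLoopA, divLoopB]
      have hguard : a ≥ i ∧ b ≥ i := by omega
      simp only [hguard, and_self, dite_true, hig, dite_true]
      have hcond : (PySem.Int.mod a i = 0 ∧ PySem.Int.mod b i = 0) ↔ PySem.Int.mod g i = 0 := by
        rw [PySem.Int.mod_eq_zero_iff_dvd, PySem.Int.mod_eq_zero_iff_dvd,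
          PySem.Int.mod_eq_zero_iff_dvd]
        constructor
        · rintro ⟨h1, h2⟩; exact hgk i h1 h2
        · intro h; exact ⟨h.trans hga, h.trans hgb⟩
      by_cases hc : PySem.Int.mod g i = 0
      · rw [if_pos (hcond.mpr hc), if_pos hc]
        exact ih (i + 1) (p * i) (by omega) (by omega)
      · rw [if_neg (fun h => hc (hcond.mp h)), if_neg hc]
        exact ih (i + 1) p (by omega) (by omega)
    · rw [divLoopB]
      simp only [hig, dite_false]
      exact ebobLoopA_tail a b g hg1 hgk (min a b + 1 - i).toNat i p (le_refl _) (by omega)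

-- ===== VERDICT (by name: the statement is the Claim_ definition above) =====
theorem ebob_bul_spec : Claim_equal_ebob_bul := by
  intro a b _hdom
  unfold Spec_ebob_bul ebob_bul ebob_bul_alt
  by_cases hsmall : a < 1 ∨ b < 1
  · rw [if_pos hsmall, ebobLoopA]
    have : ¬ (a ≥ 1 ∧ b ≥ 1) := by omega
    simp [this]
  · rw [if_neg hsmall]
    push Not at hsmall
    obtain ⟨ha, hb⟩ := hsmall
    obtain ⟨hg1, hga, hgb, hgk⟩ := gcdLoopB_props b.natAbs b a (le_refl _) (by omega) ha
    exact loop_eq a b (gcdLoopB a b) ha hb hg1 hga hgb hgk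
      (gcdLoopB a b + 1 - 1).toNat 1 1 (le_refl _) (le_refl _)
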